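-- pv_equiv track=rewrite | github.com/cjfal2/aLGoRiTHM | 프로그래머스/lv1/42840. 모의고사/모의고사.py | solution
-- ===== SOURCE A (Python) =====
-- def solution(answers):
--     answer = []
--     answers = list(map(str, answers))
--     a=b=c=0
--
--     a1 = "12345"
--     b1 = "21232425"
--     c1 = "3311224455"
--
--     for idx in range(len(answers)):
--         if answers[idx] == a1[idx%5]:
--             a += 1
--         if answers[idx] == b1[idx%8]:
--             b += 1
--         if answers[idx] == c1[idx%10]:
--             c += 1
--
--     temp = [a,b,c]
--     MAX = max(temp)
--     for k in range(3):
--         if temp[k] == MAX: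
--             answer.append(k+1)
--
--     return answer
-- ===== SOURCE B (Python) =====
-- def solution(answers):
--     patterns = ("12345", "21232425", "3311224455")
--     # Group the stringified answers by their index residue mod 40 (lcm of the
--     # three cycle lengths 5, 8, 10): one bucket-building pass, then each
--     # pattern's score is a 40-term lookup sum, with no per-element comparison.
--     buckets = {}
--     for i, a in enumerate(answers):
--         buckets.setdefault(i % 40, []).append(str(a))
--     scores = [sum(buckets.get(r, []).count(p[r % len(p)]) for r in range(40))
--               for p in patterns]
--     m = max(scores)
--     return [k + 1 for k, s in enumerate(scores) if s == m]
-- ===== Notes on version B (the rewrite author's own statement) =====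
-- stated objective: alternative
-- what changed: Instead of comparing every answer against all three cyclic patterns in one indexed loop, B groups the stringified answers once into a dict of buckets keyed by index residue mod 40 (the lcm of the cycle lengths 5, 8, 10), then scores each pattern as a 40-term sum of per-bucket digit counts, and selects the top indices by a filter over enumerate.
import Mathlib
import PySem

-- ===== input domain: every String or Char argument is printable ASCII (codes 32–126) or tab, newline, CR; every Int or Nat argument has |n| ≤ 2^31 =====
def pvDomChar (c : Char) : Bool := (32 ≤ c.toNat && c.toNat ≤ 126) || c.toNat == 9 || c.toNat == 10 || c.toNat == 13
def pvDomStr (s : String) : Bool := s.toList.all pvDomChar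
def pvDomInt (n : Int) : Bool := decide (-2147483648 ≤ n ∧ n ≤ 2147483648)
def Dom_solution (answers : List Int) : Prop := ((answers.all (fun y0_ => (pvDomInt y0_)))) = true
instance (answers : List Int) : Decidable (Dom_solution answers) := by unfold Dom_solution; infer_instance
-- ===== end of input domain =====

-- B replaces A's per-element pattern comparison with a group-by: answers are bucketed once by
-- index residue mod 40 (lcm of the cycle lengths), then each pattern is scored by 40 bucket
-- count lookups; same O(n) cost, different algorithm. Return values are proved equal everywhere.

-- ===== PORT A =====
-- A: one combined loop over indices carrying three counters, then max and a range(3) append loop.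
def solution (answers : List Int) : List Int :=
  let strs := answers.map PySem.Int.toChars
  let a1 : List Char := ['1','2','3','4','5']
  let b1 : List Char := ['2','1','2','3','2','4','2','5']
  let c1 : List Char := ['3','3','1','1','2','2','4','4','5','5']
  let s := (PySem.List.pyRange 0 (PySem.List.len strs) 1).foldl
    (fun (s : Int × Int × Int) idx =>
      let x := PySem.List.pyGetD strs idx []
      ((if x = [PySem.List.pyGetD a1 (PySem.Int.mod idx 5) ' '] then s.1 + 1 else s.1),
       (if x = [PySem.List.pyGetD b1 (PySem.Int.mod idx 8) ' '] then s.2.1 + 1 else s.2.1),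
       (if x = [PySem.List.pyGetD c1 (PySem.Int.mod idx 10) ' '] then s.2.2 + 1 else s.2.2)))
    (0, 0, 0)
  let temp : List Int := [s.1, s.2.1, s.2.2]
  let MAX : Int := (PySem.List.max? temp id).getD 0
  (PySem.List.pyRange 0 3 1).foldl
    (fun acc k => if PySem.List.pyGetD temp k 0 = MAX then acc ++ [k + 1] else acc) []

-- ===== PORT B =====
-- B: bucket str(answer) by index residue mod 40 into a dict (setdefault(..,[]).append = modify
-- with default []); score each pattern by 40 bucket count lookups; select top indices.
def solution_alt (answers : List Int) : List Int :=
  let patterns : List (List Char) :=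
    [['1','2','3','4','5'],
     ['2','1','2','3','2','4','2','5'],
     ['3','3','1','1','2','2','4','4','5','5']]
  let buckets : PySem.Dict Int (List (List Char)) :=
    (PySem.List.enumerate answers 0).foldl
      (fun d q => d.modify (PySem.Int.mod q.1 40) [] (· ++ [PySem.Int.toChars q.2]))
      PySem.Dict.empty
  let scores : List Int := patterns.map (fun p =>
    ((PySem.List.pyRange 0 40 1).map (fun r =>
      (PySem.List.count (buckets.getD r [])
        [PySem.List.pyGetD p (PySem.Int.mod r (PySem.List.len p)) ' '] : Int))).sum)
  let m : Int := (PySem.List.max? scores id).getD 0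
  ((PySem.List.enumerate scores 0).filter (fun q => q.2 = m)).map (fun q => q.1 + 1)

-- ===== PRECONDITION & SPEC =====
def Spec_solution (answers : List Int) (out : List Int) : Prop := out = solution_alt answers
instance (answers : List Int) (out : List Int) : Decidable (Spec_solution answers out) := by unfold Spec_solution; infer_instance

-- ===== CLAIM (what is proved, stated in full; the proofs are below) =====
def Claim_equal_solution : Prop := ∀ (answers : List Int), Dom_solution answers → Spec_solution answers (solution answers)

-- ===== LEMMAS AND PROOFS =====

-- A's product-state fold splits into three independent counting folds.
theorem foldl_prod3 (strs : List (List Char)) (l : List Int) (x y z : Int) :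
    l.foldl
      (fun (s : Int × Int × Int) idx =>
        ((if PySem.List.pyGetD strs idx [] =
              [PySem.List.pyGetD ['1','2','3','4','5'] (PySem.Int.mod idx 5) ' '] then s.1 + 1 else s.1),
         (if PySem.List.pyGetD strs idx [] =
              [PySem.List.pyGetD ['2','1','2','3','2','4','2','5'] (PySem.Int.mod idx 8) ' '] then s.2.1 + 1 else s.2.1),
         (if PySem.List.pyGetD strs idx [] =
              [PySem.List.pyGetD ['3','3','1','1','2','2','4','4','5','5'] (PySem.Int.mod idx 10) ' '] then s.2.2 + 1 else s.2.2)))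
      (x, y, z)
    = (l.foldl (fun a idx => if PySem.List.pyGetD strs idx [] =
          [PySem.List.pyGetD ['1','2','3','4','5'] (PySem.Int.mod idx 5) ' '] then a + 1 else a) x,
       l.foldl (fun a idx => if PySem.List.pyGetD strs idx [] =
          [PySem.List.pyGetD ['2','1','2','3','2','4','2','5'] (PySem.Int.mod idx 8) ' '] then a + 1 else a) y,
       l.foldl (fun a idx => if PySem.List.pyGetD strs idx [] =
          [PySem.List.pyGetD ['3','3','1','1','2','2','4','4','5','5'] (PySem.Int.mod idx 10) ' '] then a + 1 else a) z) := by
  induction l generalizing x y z with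
  | nil => rfl
  | cons a t ih => simp only [List.foldl_cons]; rw [ih]

-- Sum over a nodup list of a function vanishing off one member is its value there.
theorem sum_single (g : Int → Int) (L : List Int) (hnd : L.Nodup) (r0 : Int) (hm : r0 ∈ L)
    (h0 : ∀ r ∈ L, r ≠ r0 → g r = 0) : (L.map g).sum = g r0 := by
  induction L with
  | nil => cases hm
  | cons a t ih =>
    rcases List.mem_cons.mp hm with h | h
    · subst h
      have : (t.map g).sum = 0 := by
        apply List.sum_eq_zero
        intro x hx
        rcases List.mem_map.mp hx with ⟨r, hr, rfl⟩
        exact h0 r (List.mem_cons_of_mem _ hr)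
          (fun he => (List.nodup_cons.mp hnd).1 (he ▸ hr))
      simp [this]
    · have ha : g a = 0 := h0 a List.mem_cons_self
        (fun he => (List.nodup_cons.mp hnd).1 (he ▸ h))
      simp [ha, ih (List.nodup_cons.mp hnd).2 h
        (fun r hr hne => h0 r (List.mem_cons_of_mem _ hr) hne)]

-- One element's indicator summed over the 40 residues collapses to its own residue's term.
theorem sum_indicator (f : Int → List Char) (q : Int × List Char)
    (h1 : 0 ≤ q.1) (h2 : q.1 < 40) :
    ((PySem.List.pyRange 0 40 1).map
        (fun r => if (q.1 == r && q.2 == f r) = true then (1 : Int) else 0)).sum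
      = if (q.2 == f q.1) = true then 1 else 0 := by
  rw [sum_single _ _ (by decide) q.1 (PySem.List.mem_pyRange_one.mpr ⟨h1, h2⟩)]
  · simp
  · intro r _ hne
    simp [Ne.symm hne]

-- Partition: summing per-residue match counts over all 40 residues counts all matches,
-- provided every key lies in [0, 40).
theorem partition_sum (f : Int → List Char) (l : List (Int × List Char))
    (h : ∀ q ∈ l, 0 ≤ q.1 ∧ q.1 < 40) :
    ((PySem.List.pyRange 0 40 1).map
        (fun r => (l.countP (fun q => q.1 == r && q.2 == f r) : Int))).sum
      = (l.countP (fun q => q.2 == f q.1) : Int) := by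
  induction l with
  | nil => simp
  | cons q t ih =>
    have hq := h q List.mem_cons_self
    have ht : ∀ p ∈ t, 0 ≤ p.1 ∧ p.1 < 40 := fun p hp => h p (List.mem_cons_of_mem _ hp)
    simp only [List.countP_cons]
    push_cast
    rw [show ((PySem.List.pyRange 0 40 1).map
          (fun r => (t.countP (fun q' => q'.1 == r && q'.2 == f r) : Int)
            + if (q.1 == r && q.2 == f r) = true then 1 else 0)).sum
        = ((PySem.List.pyRange 0 40 1).map
            (fun r => (t.countP (fun q' => q'.1 == r && q'.2 == f r) : Int))).sum
          + ((PySem.List.pyRange 0 40 1).map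
            (fun r => if (q.1 == r && q.2 == f r) = true then (1 : Int) else 0)).sum
      from PySem.List.sum_map_add_int _ _ _]
    rw [ih ht, sum_indicator f q hq.1 hq.2]

-- The selection stage: A's fold over range(3) vs B's filter-map over enumerate, on a 3-list.
theorem select_eq (x y z m : Int) :
    (PySem.List.pyRange 0 3 1).foldl
        (fun acc k => if PySem.List.pyGetD [x, y, z] k 0 = m then acc ++ [k + 1] else acc) []
      = ((PySem.List.enumerate [x, y, z] 0).filter (fun p => p.2 = m)).map (fun p => p.1 + 1) := by
  have h3 : PySem.List.pyRange 0 3 1 = [0, 1, 2] := by decide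
  rw [h3]
  simp only [List.foldl_cons, List.foldl_nil, PySem.List.enumerate_cons,
    PySem.List.enumerate_nil, List.filter_cons, List.filter_nil]
  norm_num [PySem.List.pyGetD]
  split_ifs <;> simp_all

-- B's bucket-sum score for one pattern equals A's direct counting fold, for any pattern
-- whose length is positive and divides 40.
theorem score_eq (answers : List Int) (p : List Char) (n : Int)
    (hn : n = (p.length : Int)) (hpos : 0 < n) (hdvd : n ∣ 40) :
    ((PySem.List.pyRange 0 40 1).map (fun r =>
        (PySem.List.count
          (((PySem.List.enumerate answers 0).foldl
              (fun d q => d.modify (PySem.Int.mod q.1 40) [] (· ++ [PySem.Int.toChars q.2]))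
              PySem.Dict.empty).getD r [])
          [PySem.List.pyGetD p (PySem.Int.mod r (PySem.List.len p)) ' '] : Int))).sum
      = (PySem.List.pyRange 0 (PySem.List.len (answers.map PySem.Int.toChars)) 1).foldl
          (fun a idx => if PySem.List.pyGetD (answers.map PySem.Int.toChars) idx [] =
              [PySem.List.pyGetD p (PySem.Int.mod idx n) ' '] then a + 1 else a) 0 := by
  subst hn
  -- name the key/value-mapped enumeration
  set l : List (Int × List Char) :=
    (PySem.List.enumerate answers 0).map
      (fun q => (PySem.Int.mod q.1 40, PySem.Int.toChars q.2)) with hl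
  -- B's fold is a fold over l
  have hfold : (PySem.List.enumerate answers 0).foldl
      (fun d q => d.modify (PySem.Int.mod q.1 40) [] (· ++ [PySem.Int.toChars q.2]))
      PySem.Dict.empty
      = l.foldl (fun d q => d.modify q.1 [] (· ++ [q.2])) PySem.Dict.empty := by
    rw [hl, List.foldl_map]
  rw [hfold]
  -- each bucket is the residue-class filter of l
  have hbucket : ∀ r : Int,
      (l.foldl (fun d q => d.modify q.1 [] (· ++ [q.2])) PySem.Dict.empty).getD r []
        = (l.filter (fun q => q.1 == r)).map (·.2) := by
    intro r
    rw [PySem.Dict.getD_foldl_modify_append]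
    simp [PySem.Dict.empty, PySem.Dict.getD, PySem.Dict.get?]
  -- turn each bucket count into a countP over l
  have hcount : ∀ r : Int,
      (PySem.List.count
          ((l.foldl (fun d q => d.modify q.1 [] (· ++ [q.2])) PySem.Dict.empty).getD r [])
          [PySem.List.pyGetD p (PySem.Int.mod r (PySem.List.len p)) ' '] : Int)
        = (l.countP (fun q => q.1 == r &&
            q.2 == [PySem.List.pyGetD p (PySem.Int.mod r (PySem.List.len p)) ' ']) : Int) := by
    intro r
    rw [hbucket r, PySem.List.count_eq, List.count_eq_countP, List.countP_map,
        List.countP_filter]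
    congr 1
    apply List.countP_congr
    intro a _
    simp [Function.comp, and_comm]
  simp only [hcount]
  -- keys of l are in [0,40)
  have hkeys : ∀ q ∈ l, 0 ≤ q.1 ∧ q.1 < 40 := by
    intro q hq
    rcases List.mem_map.mp hq with ⟨q0, _, rfl⟩
    exact ⟨PySem.Int.mod_nonneg _ (by norm_num), PySem.Int.mod_lt _ (by norm_num)⟩
  rw [partition_sum (fun i => [PySem.List.pyGetD p (PySem.Int.mod i (PySem.List.len p)) ' ']) l hkeys]
  -- the residue key can be replaced by the raw index: len p divides 40
  have hmod : ∀ i : Int, PySem.Int.mod (PySem.Int.mod i 40) ((p.length : Int))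
      = PySem.Int.mod i ((p.length : Int)) := by
    intro i
    rw [PySem.Int.mod_eq_emod_of_pos (show (0:Int) < 40 by norm_num),
        PySem.Int.mod_eq_emod_of_pos hpos, PySem.Int.mod_eq_emod_of_pos hpos]
    exact Int.emod_emod_of_dvd i hdvd
  -- countP over l pulls back to countP over the enumeration, then over the range
  rw [hl, List.countP_map]
  rw [PySem.List.enumerate_eq_map_pyRange answers 0, List.countP_map]
  -- A's fold is a countP over the same range
  rw [PySem.List.foldl_ite_add_one]
  simp only [PySem.List.len_eq, List.length_map, zero_add]
  congr 1
  apply List.countP_congr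
  intro i hi
  have hib := PySem.List.mem_pyRange_one.mp hi
  simp only [Function.comp]
  have hget : PySem.List.pyGetD (answers.map PySem.Int.toChars) i []
      = PySem.Int.toChars (PySem.List.pyGetD answers i 0) := by
    rw [PySem.List.pyGetD_eq_getElem (answers.map PySem.Int.toChars) [] hib.1 (by simpa using hib.2),
        PySem.List.pyGetD_eq_getElem answers 0 hib.1 (by simpa using hib.2)]
    simp
  rw [hget, hmod i]
  simp

-- ===== VERDICT (by name: the statement is the Claim_ definition above) =====
theorem solution_spec : Claim_equal_solution := by
  intro answers _
  unfold Spec_solution solution solution_alt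
  simp only []
  rw [foldl_prod3]
  simp only [List.map_cons, List.map_nil]
  rw [← score_eq answers ['1','2','3','4','5'] 5 (by decide) (by norm_num) (by decide),
      ← score_eq answers ['2','1','2','3','2','4','2','5'] 8 (by decide) (by norm_num) (by decide),
      ← score_eq answers ['3','3','1','1','2','2','4','4','5','5'] 10 (by decide) (by norm_num) (by decide)]
  rw [select_eq]
  rfl
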